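-- pv_equiv track=rewrite | github.com/Traigent/Traigent | traigent/core/trial_result_factory.py | _select_primary_objective
-- ===== SOURCE A (Python) =====
-- def _select_primary_objective(per_metric_counts: dict[str, int]) -> str:
--     """Choose a reasonable primary objective from available metric counts."""
--     for preferred in ("accuracy", "score"):
--         if preferred in per_metric_counts:
--             return preferred
--
--     accuracy_like = sorted(
--         metric_name
--         for metric_name in per_metric_counts
--         if metric_name.endswith("_accuracy")
--     )
--     if accuracy_like:
--         return accuracy_like[0]
--
--     for preferred in ("total_cost", "cost", "latency", "response_time_ms"):
--         if preferred in per_metric_counts: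
--             return preferred
--
--     if per_metric_counts:
--         return sorted(per_metric_counts)[0]
--     return "unknown"
-- ===== SOURCE B (Python) =====
-- def _bucket(name: str) -> int:
--     if name == "accuracy":
--         return 0
--     if name == "score":
--         return 1
--     if name.endswith("_accuracy"):
--         return 2
--     if name == "total_cost":
--         return 3
--     if name == "cost":
--         return 4
--     if name == "latency":
--         return 5
--     if name == "response_time_ms":
--         return 6
--     return 7
--
--
-- def _select_primary_objective(per_metric_counts: dict[str, int]) -> str:
--     """Choose a reasonable primary objective from available metric counts."""
--     if not per_metric_counts:
--         return "unknown"
--     return min(per_metric_counts, key=lambda name: (_bucket(name), name))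
-- ===== Notes on version B (the rewrite author's own statement) =====
-- stated objective: simpler
-- what changed: Replaced A's multi-phase early-return scan (two preference loops, a sorted filtered list, and a final sorted fallback) by a single min() over the metric names keyed by a priority bucket paired with the name.
import Mathlib
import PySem

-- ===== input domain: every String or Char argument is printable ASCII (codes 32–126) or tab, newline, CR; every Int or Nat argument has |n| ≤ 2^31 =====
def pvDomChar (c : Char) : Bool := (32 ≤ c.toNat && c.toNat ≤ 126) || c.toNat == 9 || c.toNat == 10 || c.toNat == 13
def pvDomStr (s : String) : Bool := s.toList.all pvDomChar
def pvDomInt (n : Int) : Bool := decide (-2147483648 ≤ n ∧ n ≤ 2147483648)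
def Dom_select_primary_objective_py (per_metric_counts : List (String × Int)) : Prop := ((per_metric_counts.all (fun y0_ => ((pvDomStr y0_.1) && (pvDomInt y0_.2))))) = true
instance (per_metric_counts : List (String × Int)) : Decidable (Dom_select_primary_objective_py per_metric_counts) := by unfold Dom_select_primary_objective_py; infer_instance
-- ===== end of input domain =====

-- B replaces A's multi-phase early-return scan by a single priority-keyed min (objective: simpler decomposition).


-- ===== PORT A =====
def select_primary_objective_py (per_metric_counts : List (String × Int)) : String :=
  let ks := per_metric_counts.map (·.1)
  -- for preferred in ("accuracy", "score"): if preferred in per_metric_counts: return preferred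
  if ks.contains "accuracy" then "accuracy"
  else if ks.contains "score" then "score"
  else
    -- accuracy_like = sorted(m for m in per_metric_counts if m.endswith("_accuracy"))
    let accuracy_like := PySem.List.sorted (ks.filter (fun m => PySem.Str.endswith m "_accuracy")) (fun x => x) false
    match accuracy_like with
    | m :: _ => m
    | [] =>
      -- for preferred in ("total_cost", "cost", "latency", "response_time_ms"): …
      if ks.contains "total_cost" then "total_cost"
      else if ks.contains "cost" then "cost"
      else if ks.contains "latency" then "latency"
      else if ks.contains "response_time_ms" then "response_time_ms"
      else
        -- if per_metric_counts: return sorted(per_metric_counts)[0]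
        match PySem.List.sorted ks (fun x => x) false with
        | m :: _ => m
        | [] => "unknown"

-- ===== PORT B =====
def pvBucket (name : String) : Int :=
  if name = "accuracy" then 0
  else if name = "score" then 1
  else if PySem.Str.endswith name "_accuracy" then 2
  else if name = "total_cost" then 3
  else if name = "cost" then 4
  else if name = "latency" then 5
  else if name = "response_time_ms" then 6
  else 7

def select_primary_objective_py_alt (per_metric_counts : List (String × Int)) : String :=
  let ks := per_metric_counts.map (·.1)
  match PySem.List.min2? ks pvBucket (fun name => name) with
  | some m => m
  | none => "unknown"

-- ===== PRECONDITION & SPEC =====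
def Spec_select_primary_objective_py (per_metric_counts : List (String × Int)) (out : String) : Prop := out = select_primary_objective_py_alt per_metric_counts
instance (per_metric_counts : List (String × Int)) (out : String) : Decidable (Spec_select_primary_objective_py per_metric_counts out) := by unfold Spec_select_primary_objective_py; infer_instance

-- ===== CLAIM (what is proved, stated in full; the proofs are below) =====
def Claim_equal_select_primary_objective_py : Prop := ∀ (per_metric_counts : List (String × Int)), Dom_select_primary_objective_py per_metric_counts → Spec_select_primary_objective_py per_metric_counts (select_primary_objective_py per_metric_counts)

-- ===== LEMMAS AND PROOFS =====

-- "m is lexicographically minimal for the key (pvBucket ·, ·)"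
def pvLle (x y : String) : Prop := pvBucket x < pvBucket y ∨ (pvBucket x = pvBucket y ∧ x ≤ y)

theorem pvLle_refl (x : String) : pvLle x x := Or.inr ⟨rfl, le_refl x⟩

theorem pvLle_trans {x y z : String} (h1 : pvLle x y) (h2 : pvLle y z) : pvLle x z := by
  rcases h1 with h1 | ⟨h1, h1'⟩ <;> rcases h2 with h2 | ⟨h2, h2'⟩
  · exact Or.inl (lt_trans h1 h2)
  · exact Or.inl (h2 ▸ h1)
  · exact Or.inl (h1 ▸ h2)
  · exact Or.inr ⟨h1.trans h2, le_trans h1' h2'⟩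

theorem pvLle_antisymm {x y : String} (h1 : pvLle x y) (h2 : pvLle y x) : x = y := by
  rcases h1 with h1 | ⟨_, h1'⟩ <;> rcases h2 with h2 | ⟨_, h2'⟩
  · exact absurd h2 (not_lt_of_gt h1)
  · omega
  · omega
  · exact le_antisymm h1' h2'

-- the step function of PySem.List.min2? at our keys
def pvStep (acc : Option String) (x : String) : Option String :=
  match acc with
  | none => some x
  | some m =>
    if (decide (pvBucket x < pvBucket m) || !decide (pvBucket m < pvBucket x) && decide (x < m)) = true then some x else some m

theorem pv_min2_eq_foldl (ks : List String) :
    PySem.List.min2? ks pvBucket (fun name => name) = ks.foldl pvStep none := by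
  unfold PySem.List.min2?
  congr 1
  funext a x
  cases a <;> rfl

-- the min2? fold, run from a `some` accumulator, yields a lex-minimal element
theorem pv_fold_min_spec (ks : List String) (m0 : String) :
    ∃ m, ks.foldl pvStep (some m0) = some m ∧ (m = m0 ∨ m ∈ ks) ∧ pvLle m m0 ∧ ∀ y ∈ ks, pvLle m y := by
  induction ks generalizing m0 with
  | nil => exact ⟨m0, rfl, Or.inl rfl, pvLle_refl m0, by simp⟩
  | cons x t ih =>
    simp only [List.foldl_cons]
    by_cases hc : (decide (pvBucket x < pvBucket m0) || !decide (pvBucket m0 < pvBucket x) && decide (x < m0)) = true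
    · rw [show pvStep (some m0) x = some x from by simp only [pvStep]; rw [if_pos hc]]
      obtain ⟨m, hm, hmem, hle, hall⟩ := ih x
      have hxm0 : pvLle x m0 := by
        simp only [Bool.or_eq_true, Bool.and_eq_true, Bool.not_eq_true', decide_eq_true_eq, decide_eq_false_iff_not] at hc
        rcases hc with h | ⟨h1, h2⟩
        · exact Or.inl h
        · by_cases hb : pvBucket x < pvBucket m0
          · exact Or.inl hb
          · exact Or.inr ⟨by omega, le_of_lt h2⟩
      refine ⟨m, hm, ?_, pvLle_trans hle hxm0, ?_⟩
      · rcases hmem with h | h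
        · exact Or.inr (h ▸ List.mem_cons_self)
        · exact Or.inr (List.mem_cons_of_mem _ h)
      · intro y hy
        rcases List.mem_cons.mp hy with h | h
        · exact h ▸ hle
        · exact hall y h
    · rw [show pvStep (some m0) x = some m0 from by simp only [pvStep]; rw [if_neg hc]]
      obtain ⟨m, hm, hmem, hle, hall⟩ := ih m0
      have hm0x : pvLle m0 x := by
        by_cases hb : pvBucket m0 < pvBucket x
        · exact Or.inl hb
        · have hx1 : ¬ pvBucket x < pvBucket m0 := fun h => hc (by simp [h])
          have hx2 : ¬ x < m0 := fun h => hc (by simp [h, hb])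
          exact Or.inr ⟨le_antisymm (not_lt.mp hx1) (not_lt.mp hb), not_lt.mp hx2⟩
      refine ⟨m, hm, ?_, hle, ?_⟩
      · rcases hmem with h | h
        · exact Or.inl h
        · exact Or.inr (List.mem_cons_of_mem _ h)
      · intro y hy
        rcases List.mem_cons.mp hy with h | h
        · exact h ▸ pvLle_trans hle hm0x
        · exact hall y h

theorem pv_min2_spec (ks : List String) (hne : ks ≠ []) :
    ∃ m, PySem.List.min2? ks pvBucket (fun name => name) = some m ∧ m ∈ ks ∧ ∀ y ∈ ks, pvLle m y := by
  cases ks with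
  | nil => exact absurd rfl hne
  | cons x t =>
    obtain ⟨m, hm, hmem, hle, hall⟩ := pv_fold_min_spec t x
    refine ⟨m, ?_, ?_, ?_⟩
    · rw [pv_min2_eq_foldl]
      simpa [pvStep] using hm
    · rcases hmem with h | h
      · exact h ▸ List.mem_cons_self
      · exact List.mem_cons_of_mem _ h
    · intro y hy
      rcases List.mem_cons.mp hy with h | h
      · exact h ▸ hle
      · exact hall y h

-- bucket facts
theorem pvBucket_eq_zero_iff (x : String) : pvBucket x = 0 ↔ x = "accuracy" := by
  unfold pvBucket
  constructor
  · intro h; split_ifs at h <;> simp_all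
  · intro h; subst h; decide

theorem pvBucket_eq_one_iff (x : String) : pvBucket x = 1 ↔ x = "score" := by
  unfold pvBucket
  constructor
  · intro h; split_ifs at h <;> simp_all
  · intro h; subst h; decide

theorem pvBucket_eq_two_iff (x : String) :
    pvBucket x = 2 ↔ PySem.Str.endswith x "_accuracy" = true := by
  unfold pvBucket
  constructor
  · intro h; split_ifs at h <;> simp_all
  · intro h
    have h1 : x ≠ "accuracy" := by rintro rfl; exact absurd h (by decide)
    have h2 : x ≠ "score" := by rintro rfl; exact absurd h (by decide)
    rw [if_neg h1, if_neg h2, if_pos h]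

theorem pvBucket_eq_three_iff (x : String) : pvBucket x = 3 ↔ x = "total_cost" := by
  unfold pvBucket
  constructor
  · intro h; split_ifs at h <;> simp_all
  · intro h; subst h; decide

theorem pvBucket_eq_four_iff (x : String) : pvBucket x = 4 ↔ x = "cost" := by
  unfold pvBucket
  constructor
  · intro h; split_ifs at h <;> simp_all
  · intro h; subst h; decide

theorem pvBucket_eq_five_iff (x : String) : pvBucket x = 5 ↔ x = "latency" := by
  unfold pvBucket
  constructor
  · intro h; split_ifs at h <;> simp_all
  · intro h; subst h; decide

theorem pvBucket_eq_six_iff (x : String) : pvBucket x = 6 ↔ x = "response_time_ms" := by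
  unfold pvBucket
  constructor
  · intro h; split_ifs at h <;> simp_all
  · intro h; subst h; decide

theorem pvBucket_nonneg (x : String) : 0 ≤ pvBucket x := by
  unfold pvBucket; split_ifs <;> omega

theorem pvBucket_le_seven (x : String) : pvBucket x ≤ 7 := by
  unfold pvBucket; split_ifs <;> omega

-- A's result is a member of ks and lex-minimal, when ks ≠ []
theorem pvA_min (per_metric_counts : List (String × Int))
    (hne : per_metric_counts.map (·.1) ≠ []) :
    select_primary_objective_py per_metric_counts ∈ per_metric_counts.map (·.1) ∧
    ∀ y ∈ per_metric_counts.map (·.1), pvLle (select_primary_objective_py per_metric_counts) y := by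
  unfold select_primary_objective_py
  set ks := per_metric_counts.map (·.1) with hks
  simp only
  by_cases hacc : ks.contains "accuracy"
  · rw [if_pos hacc]
    refine ⟨List.contains_iff_mem.mp hacc, fun y _ => ?_⟩
    by_cases hy : y = "accuracy"
    · exact hy ▸ pvLle_refl _
    · have h1 : pvBucket y ≠ 0 := fun h => hy ((pvBucket_eq_zero_iff y).mp h)
      have h2 := pvBucket_nonneg y
      exact Or.inl (by rw [show pvBucket "accuracy" = 0 from by decide]; omega)
  · rw [if_neg hacc]
    have haccm : "accuracy" ∉ ks := fun h => hacc (List.contains_iff_mem.mpr h)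
    by_cases hsc : ks.contains "score"
    · rw [if_pos hsc]
      refine ⟨List.contains_iff_mem.mp hsc, fun y hy => ?_⟩
      by_cases hy1 : y = "score"
      · exact hy1 ▸ pvLle_refl _
      · have h0 : pvBucket y ≠ 0 := fun h => haccm (((pvBucket_eq_zero_iff y).mp h) ▸ hy)
        have h1 : pvBucket y ≠ 1 := fun h => hy1 ((pvBucket_eq_one_iff y).mp h)
        have h2 := pvBucket_nonneg y
        exact Or.inl (by rw [show pvBucket "score" = 1 from by decide]; omega)
    · rw [if_neg hsc]
      have hscm : "score" ∉ ks := fun h => hsc (List.contains_iff_mem.mpr h)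
      cases hsrt : PySem.List.sorted (ks.filter (fun m => PySem.Str.endswith m "_accuracy")) (fun x => x) false with
      | cons m t =>
        dsimp only
        have hmem : m ∈ ks.filter (fun m => PySem.Str.endswith m "_accuracy") :=
          (PySem.List.mem_sorted _ (fun x => x) false m).mp (hsrt ▸ List.mem_cons_self)
        have hmk : m ∈ ks := List.mem_of_mem_filter hmem
        have hmsuf : PySem.Str.endswith m "_accuracy" = true := List.of_mem_filter (p := fun m => PySem.Str.endswith m "_accuracy") hmem
        have hm2 : pvBucket m = 2 := (pvBucket_eq_two_iff m).mpr hmsuf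
        refine ⟨hmk, fun y hy => ?_⟩
        have hy0 : pvBucket y ≠ 0 := fun h => haccm (((pvBucket_eq_zero_iff y).mp h) ▸ hy)
        have hy1 : pvBucket y ≠ 1 := fun h => hscm (((pvBucket_eq_one_iff y).mp h) ▸ hy)
        by_cases hys : PySem.Str.endswith y "_accuracy" = true
        · have hyf : y ∈ ks.filter (fun m => PySem.Str.endswith m "_accuracy") :=
            List.mem_filter.mpr ⟨hy, hys⟩
          exact Or.inr ⟨by rw [hm2, Eq.comm, pvBucket_eq_two_iff]; exact hys,
            PySem.List.key_head_sorted_le _ (fun x => x) hsrt y hyf⟩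
        · have hy2 : pvBucket y ≠ 2 := fun h => hys ((pvBucket_eq_two_iff y).mp h)
          have := pvBucket_nonneg y
          exact Or.inl (by omega)
      | nil =>
        dsimp only
        have hfe : ks.filter (fun m => PySem.Str.endswith m "_accuracy") = [] :=
          (PySem.List.sorted_eq_nil_iff _ _ _).mp hsrt
        have hnosuf : ∀ y ∈ ks, ¬ PySem.Str.endswith y "_accuracy" = true := by
          intro y hy h
          have hmemf : y ∈ ks.filter (fun m => PySem.Str.endswith m "_accuracy") :=
            List.mem_filter.mpr ⟨hy, h⟩
          rw [hfe] at hmemf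
          simp at hmemf
        have hbuck : ∀ y ∈ ks, 3 ≤ pvBucket y := by
          intro y hy
          have hy0 : pvBucket y ≠ 0 := fun h => haccm (((pvBucket_eq_zero_iff y).mp h) ▸ hy)
          have hy1 : pvBucket y ≠ 1 := fun h => hscm (((pvBucket_eq_one_iff y).mp h) ▸ hy)
          have hy2 : pvBucket y ≠ 2 := fun h => hnosuf y hy ((pvBucket_eq_two_iff y).mp h)
          have := pvBucket_nonneg y
          omega
        by_cases htc : ks.contains "total_cost"
        · rw [if_pos htc]
          refine ⟨List.contains_iff_mem.mp htc, fun y hy => ?_⟩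
          by_cases hy3 : y = "total_cost"
          · exact hy3 ▸ pvLle_refl _
          · have h3 : pvBucket y ≠ 3 := fun h => hy3 ((pvBucket_eq_three_iff y).mp h)
            have := hbuck y hy
            exact Or.inl (by rw [(pvBucket_eq_three_iff "total_cost").mpr rfl]; omega)
        · rw [if_neg htc]
          have htcm : "total_cost" ∉ ks := fun h => htc (List.contains_iff_mem.mpr h)
          by_cases hco : ks.contains "cost"
          · rw [if_pos hco]
            refine ⟨List.contains_iff_mem.mp hco, fun y hy => ?_⟩
            by_cases hy4 : y = "cost"
            · exact hy4 ▸ pvLle_refl _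
            · have h3 : pvBucket y ≠ 3 := fun h => htcm (((pvBucket_eq_three_iff y).mp h) ▸ hy)
              have h4 : pvBucket y ≠ 4 := fun h => hy4 ((pvBucket_eq_four_iff y).mp h)
              have := hbuck y hy
              exact Or.inl (by rw [(pvBucket_eq_four_iff "cost").mpr rfl]; omega)
          · rw [if_neg hco]
            have hcom : "cost" ∉ ks := fun h => hco (List.contains_iff_mem.mpr h)
            by_cases hla : ks.contains "latency"
            · rw [if_pos hla]
              refine ⟨List.contains_iff_mem.mp hla, fun y hy => ?_⟩
              by_cases hy5 : y = "latency"
              · exact hy5 ▸ pvLle_refl _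
              · have h3 : pvBucket y ≠ 3 := fun h => htcm (((pvBucket_eq_three_iff y).mp h) ▸ hy)
                have h4 : pvBucket y ≠ 4 := fun h => hcom (((pvBucket_eq_four_iff y).mp h) ▸ hy)
                have h5 : pvBucket y ≠ 5 := fun h => hy5 ((pvBucket_eq_five_iff y).mp h)
                have := hbuck y hy
                exact Or.inl (by rw [(pvBucket_eq_five_iff "latency").mpr rfl]; omega)
            · rw [if_neg hla]
              have hlam : "latency" ∉ ks := fun h => hla (List.contains_iff_mem.mpr h)
              by_cases hrt : ks.contains "response_time_ms"
              · rw [if_pos hrt]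
                refine ⟨List.contains_iff_mem.mp hrt, fun y hy => ?_⟩
                by_cases hy6 : y = "response_time_ms"
                · exact hy6 ▸ pvLle_refl _
                · have h3 : pvBucket y ≠ 3 := fun h => htcm (((pvBucket_eq_three_iff y).mp h) ▸ hy)
                  have h4 : pvBucket y ≠ 4 := fun h => hcom (((pvBucket_eq_four_iff y).mp h) ▸ hy)
                  have h5 : pvBucket y ≠ 5 := fun h => hlam (((pvBucket_eq_five_iff y).mp h) ▸ hy)
                  have h6 : pvBucket y ≠ 6 := fun h => hy6 ((pvBucket_eq_six_iff y).mp h)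
                  have := hbuck y hy
                  exact Or.inl (by rw [(pvBucket_eq_six_iff "response_time_ms").mpr rfl]; omega)
              · rw [if_neg hrt]
                have hrtm : "response_time_ms" ∉ ks := fun h => hrt (List.contains_iff_mem.mpr h)
                have hall7 : ∀ y ∈ ks, pvBucket y = 7 := by
                  intro y hy
                  have h3 : pvBucket y ≠ 3 := fun h => htcm (((pvBucket_eq_three_iff y).mp h) ▸ hy)
                  have h4 : pvBucket y ≠ 4 := fun h => hcom (((pvBucket_eq_four_iff y).mp h) ▸ hy)
                  have h5 : pvBucket y ≠ 5 := fun h => hlam (((pvBucket_eq_five_iff y).mp h) ▸ hy)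
                  have h6 : pvBucket y ≠ 6 := fun h => hrtm (((pvBucket_eq_six_iff y).mp h) ▸ hy)
                  have := hbuck y hy
                  have := pvBucket_le_seven y
                  omega
                cases hsk : PySem.List.sorted ks (fun x => x) false with
                | nil => exact absurd ((PySem.List.sorted_eq_nil_iff _ _ _).mp hsk) hne
                | cons m t =>
                  dsimp only
                  have hmk : m ∈ ks :=
                    (PySem.List.mem_sorted _ (fun x => x) false m).mp (hsk ▸ List.mem_cons_self)
                  refine ⟨hmk, fun y hy =>
                    Or.inr ⟨?_, PySem.List.key_head_sorted_le _ (fun x => x) hsk y hy⟩⟩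
                  rw [hall7 m hmk, hall7 y hy]

-- ===== VERDICT (by name: the statement is the Claim_ definition above) =====
theorem select_primary_objective_py_spec : Claim_equal_select_primary_objective_py := by
  intro pmc _
  unfold Spec_select_primary_objective_py
  by_cases hne : pmc.map (·.1) = []
  · have hpmc : pmc = [] := by cases pmc <;> simp_all
    subst hpmc
    decide
  · obtain ⟨m, hm, hmem, hall⟩ := pv_min2_spec (pmc.map (·.1)) hne
    obtain ⟨hAmem, hAall⟩ := pvA_min pmc hne
    unfold select_primary_objective_py_alt
    simp only [hm]
    exact pvLle_antisymm (hAall m hmem) (hall _ hAmem)
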